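-- pv_equiv track=rewrite | github.com/Lima98/TTK4900 | code/melody_engine/theory.py | accidental_value
-- ===== SOURCE A (Python) =====
-- def accidental_value(symbol: str) -> int:
--     value = 0
--     for accidental in symbol:
--         if accidental in {"s", "#"}:
--             value += 1
--         elif accidental in {"f", "b"}:
--             value -= 1
--         else:
--             raise ValueError(f"Unsupported accidental marker: {symbol}")
--     return value
-- ===== SOURCE B (Python) =====
-- def accidental_value(symbol: str) -> int:
--     sharps = symbol.count("s") + symbol.count("#")
--     flats = symbol.count("f") + symbol.count("b")
--     if sharps + flats != len(symbol):
--         raise ValueError(f"Unsupported accidental marker: {symbol}")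
--     return sharps - flats
-- ===== Notes on version B (the rewrite author's own statement) =====
-- stated objective: alternative
-- what changed: Replaced the per-character branch-and-accumulate loop by aggregate str.count scans (sharps/flats counted separately) with a length-based validity check, returning sharps - flats.
import Mathlib
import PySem

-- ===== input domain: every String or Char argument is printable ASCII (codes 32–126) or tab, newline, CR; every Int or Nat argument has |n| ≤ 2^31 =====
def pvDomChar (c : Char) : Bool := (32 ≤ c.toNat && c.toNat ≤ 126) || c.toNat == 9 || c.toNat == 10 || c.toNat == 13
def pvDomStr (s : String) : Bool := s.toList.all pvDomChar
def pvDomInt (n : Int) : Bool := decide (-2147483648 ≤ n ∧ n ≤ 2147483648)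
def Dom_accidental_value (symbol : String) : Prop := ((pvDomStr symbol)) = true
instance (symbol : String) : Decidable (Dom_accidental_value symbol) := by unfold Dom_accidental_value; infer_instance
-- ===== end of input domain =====

-- B replaces the per-character branch-and-accumulate loop by aggregate count scans
-- (sharps/flats counted separately) with a length-based validity check; same cost, different decomposition.

-- ===== PORT A =====
-- the for-loop over the characters; the `raise` branch returns the accumulator (unreachable inside Pre_)
def accA : List Char → Int → Int
  | [], v => v
  | c :: rest, v =>
    if c = 's' ∨ c = '#' then accA rest (v + 1)
    else if c = 'f' ∨ c = 'b' then accA rest (v - 1)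
    else v  -- raise ValueError (excluded by Pre_)

def accidental_value (symbol : String) : Int := accA symbol.toList 0

-- ===== PORT B =====
def accidental_value_alt (symbol : String) : Int :=
  let sharps : Nat := PySem.Str.count symbol "s" + PySem.Str.count symbol "#"
  let flats : Nat := PySem.Str.count symbol "f" + PySem.Str.count symbol "b"
  if sharps + flats ≠ PySem.Str.len symbol then 0  -- raise ValueError (excluded by Pre_)
  else (sharps : Int) - (flats : Int)

-- ===== PRECONDITION & SPEC =====
-- Pre_ excludes exactly the inputs where A raises ValueError: a character outside {s, #, f, b}
def Pre_accidental_value (symbol : String) : Prop :=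
  (symbol.toList.all (fun c => c == 's' || c == '#' || c == 'f' || c == 'b')) = true
instance (symbol : String) : Decidable (Pre_accidental_value symbol) := by
  unfold Pre_accidental_value; infer_instance
def pvWitness_accidental_value : String := "s#fb"

def Spec_accidental_value (symbol : String) (out : Int) : Prop := out = accidental_value_alt symbol
instance (symbol : String) (out : Int) : Decidable (Spec_accidental_value symbol out) := by
  unfold Spec_accidental_value; infer_instance

-- ===== CLAIM (what is proved, stated in full; the proofs are below) =====
def Claim_equal_accidental_value : Prop := ∀ (symbol : String), Dom_accidental_value symbol → Pre_accidental_value symbol → Spec_accidental_value symbol (accidental_value symbol)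

-- ===== LEMMAS AND PROOFS =====

theorem accA_eq_counts (l : List Char) (v : Int)
    (h : ∀ c ∈ l, c = 's' ∨ c = '#' ∨ c = 'f' ∨ c = 'b') :
    accA l v = v + ((l.count 's' + l.count '#' : Nat) : Int)
                 - ((l.count 'f' + l.count 'b' : Nat) : Int) := by
  induction l generalizing v with
  | nil => simp [accA]
  | cons c rest ih =>
    have hc := h c (List.mem_cons_self)
    have hrest : ∀ x ∈ rest, x = 's' ∨ x = '#' ∨ x = 'f' ∨ x = 'b' :=
      fun x hx => h x (List.mem_cons_of_mem _ hx)
    rcases hc with rfl | rfl | rfl | rfl <;>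
      simp [accA, ih _ hrest] <;> ring

theorem count_go_single (c : Char) (l : List Char) (fuel acc : Nat)
    (h : l.length ≤ fuel) :
    PySem.Chars.count.go [c] fuel l acc = acc + l.count c := by
  induction l generalizing fuel acc with
  | nil => cases fuel <;> simp [PySem.Chars.count.go]
  | cons a rest ih =>
    cases fuel with
    | zero => simp at h
    | succ fuel =>
      have hr : rest.length ≤ fuel := by simpa using h
      by_cases hac : a = c
      · subst hac
        simp [PySem.Chars.count.go, List.isPrefixOf, ih fuel (acc + 1) hr]
        omega
      · simp [PySem.Chars.count.go, List.isPrefixOf, hac, ih fuel acc hr, Ne.symm hac]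

theorem count_singleton_eq (l : List Char) (c : Char) :
    PySem.Chars.count l [c] = l.count c := by
  simpa using count_go_single c l l.length 0 le_rfl

theorem four_count (l : List Char)
    (h : ∀ c ∈ l, c = 's' ∨ c = '#' ∨ c = 'f' ∨ c = 'b') :
    l.count 's' + l.count '#' + (l.count 'f' + l.count 'b') = l.length := by
  induction l with
  | nil => simp
  | cons c rest ih =>
    have hrest := ih (fun x hx => h x (List.mem_cons_of_mem _ hx))
    rcases h c (List.mem_cons_self) with rfl | rfl | rfl | rfl <;>
      simp <;> omega

-- ===== VERDICT (by name: the statement is the Claim_ definition above) =====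
theorem accidental_value_spec : Claim_equal_accidental_value := by
  intro symbol _ hpre0
  have hpre : ∀ c ∈ symbol.toList, c = 's' ∨ c = '#' ∨ c = 'f' ∨ c = 'b' := by
    intro c hc
    have h := List.all_eq_true.mp hpre0 c hc
    simp at h
    tauto
  unfold Spec_accidental_value accidental_value accidental_value_alt
  have hs : ("s" : String).toList = ['s'] := by decide
  have hh : ("#" : String).toList = ['#'] := by decide
  have hf : ("f" : String).toList = ['f'] := by decide
  have hb : ("b" : String).toList = ['b'] := by decide
  have hcnt : ∀ t : String, ∀ c : Char, t.toList = [c] →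
      PySem.Str.count symbol t = symbol.toList.count c := by
    intro t c ht
    simp [PySem.Str.count, ht, count_singleton_eq]
  rw [hcnt _ _ hs, hcnt _ _ hh, hcnt _ _ hf, hcnt _ _ hb,
      accA_eq_counts symbol.toList 0 hpre]
  have hlen := four_count symbol.toList hpre
  rw [show symbol.toList.length = symbol.length from by simp] at hlen
  simp [PySem.Str.len]
  omega
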